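-- pv_equiv track=rewrite | github.com/TIMHX/DSC-20---Prgrmng-DataStruc-for-Data-Sc---Archive | HW/hw05/hw05.py | k_mapping
-- ===== SOURCE A (Python) =====
-- def k_mapping(inp, k):
--     """
--     Maps each element in the circular list to the
--     element k spaces in front of it.
--
--     >>> k_mapping([1, 2, 3, 4, 5], 2)
--     '1 -> 3, 3 -> 5, 5 -> 2, 2 -> 4, 4 -> 1'
--     >>> k_mapping([1, 2, 3], 3)
--     '1 -> 1, 2 -> 2, 3 -> 3'
--
--     +++++++++++++++++++++++++
--     WRITE YOUR DOCTESTS BELOW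
--     +++++++++++++++++++++++++
--     >>> k_mapping([1, 2, 3, 4, 5], 0)
--     '1 -> 1, 2 -> 2, 3 -> 3, 4 -> 4, 5 -> 5'
--     >>> k_mapping([0], 2)
--     '0 -> 0'
--     >>> k_mapping([1, 2, 3, 4, 5], 26)
--     '1 -> 2, 2 -> 3, 3 -> 4, 4 -> 5, 5 -> 1'
--     """
--     if k > len(inp) - 1:
--         k = k % len(inp)
--     count = k
--     out = []
--     if count == 0:
--         out = inp
--     else:
--         while count != 0:
--             out.append(inp[count])
--             count += k
--             if count > len(inp) - 1:
--                 count -= len(inp)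
--         count = 1
--
--     # help list to make map
--     out2 = []
--     if count != 0:
--         for i in range(len(out)):
--             out2.append(', ' + str(out[i]) + ' -> ')
--     else:
--         for i in range(len(out)):
--             out2.append(str(out[i]) + ' -> ' + str(out[i]))
--
--     if count != 0:
--         # join two lists
--         out3 = []
--         for i in zip(out, out2):
--             out3.extend(list(i))
--         # change all elements to str
--         for i in range(len(out3)):
--             out3[i] = str(out3[i])
--         return str(inp[0]) + ' -> ' + ''.join(out3) + str(inp[0])
--     else:
--         out3 = ', '.join(out2)
--         return out3
-- ===== SOURCE B (Python) =====
-- def k_mapping(inp, k):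
--     """Maps each element in the circular list to the element k spaces in front of it,
--     emitting the chain of index 0 directly in one pass."""
--     n = len(inp)
--     kk = k if k <= n - 1 else k % n
--     if kk == 0:
--         return ', '.join('{} -> {}'.format(x, x) for x in inp)
--     parts = []
--     idx = 0
--     while True:
--         nxt = (idx + kk) % n
--         parts.append('{} -> {}'.format(inp[idx], inp[nxt]))
--         idx = nxt
--         if idx == 0:
--             break
--     return ', '.join(parts)
-- ===== Notes on version B (the rewrite author's own statement) =====
-- stated objective: simpler
-- what changed: B emits the chain of index 0 directly in one pass (append 'inp[idx] -> inp[(idx+kk)%n]' while walking the orbit), replacing A's three-list construction (index walk into out, decorated copies in out2, zip/extend interleave into out3, then str-conversion and join).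
-- crash fix: On nonempty inp with k < 0, A walks count negative until inp[count] raises IndexError, while B reduces via (idx+kk)%n and returns the chain string. — e.g. on k_mapping([1, 2, 3], -1): A raises IndexError, B returns "1 -> 3, 3 -> 2, 2 -> 1"
import Mathlib
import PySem

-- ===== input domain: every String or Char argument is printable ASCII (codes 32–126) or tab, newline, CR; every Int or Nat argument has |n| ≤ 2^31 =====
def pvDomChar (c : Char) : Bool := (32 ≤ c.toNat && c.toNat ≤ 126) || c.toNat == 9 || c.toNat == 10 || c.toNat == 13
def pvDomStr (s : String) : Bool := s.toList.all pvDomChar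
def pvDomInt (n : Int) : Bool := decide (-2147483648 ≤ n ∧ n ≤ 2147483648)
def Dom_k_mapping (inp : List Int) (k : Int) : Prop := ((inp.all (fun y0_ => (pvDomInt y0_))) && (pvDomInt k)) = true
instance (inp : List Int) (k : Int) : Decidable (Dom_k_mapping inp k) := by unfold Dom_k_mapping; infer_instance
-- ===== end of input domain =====

-- B emits the chain of index 0 in one pass instead of A's three-list interleave (objective: simpler).


-- ===== PORT A =====
-- the while loop: out.append(inp[count]); count += k; if count > len(inp)-1: count -= len(inp).
-- Fuel inp.length always suffices under Pre_ (proved below); the none-branch of pyGet? is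
-- Python's IndexError, excluded by Pre_.
def kmALoop (inp : List Int) (n kr : Int) : Nat → Int → List Int → List Int
  | 0, _, out => out
  | f + 1, count, out =>
    if count ≠ 0 then
      match PySem.List.pyGet? inp count with
      | none => out
      | some v =>
        kmALoop inp n kr f
          (if count + kr > n - 1 then count + kr - n else count + kr) (out ++ [v])
    else out

def k_mapping (inp : List Int) (k : Int) : String :=
  let n : Int := inp.length
  let kr : Int := if k > n - 1 then PySem.Int.mod k n else k
  if kr = 0 then
    -- count == 0: out = inp; out2[i] = str(out[i]) + ' -> ' + str(out[i]); return ', '.join(out2)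
    PySem.Str.join ", " (inp.map (fun x => PySem.Int.toStr x ++ " -> " ++ PySem.Int.toStr x))
  else
    -- count == 1 after the loop
    let out := kmALoop inp n kr inp.length kr []
    let out2 := out.map (fun x => ", " ++ PySem.Int.toStr x ++ " -> ")
    let out3 := (out.zip out2).foldl (fun acc p => acc ++ [PySem.Int.toStr p.1, p.2]) []
    PySem.Int.toStr ((PySem.List.pyGet? inp 0).getD 0) ++ " -> " ++
      PySem.Str.join "" out3 ++ PySem.Int.toStr ((PySem.List.pyGet? inp 0).getD 0)

-- ===== PORT B =====
-- f'{inp[i]}' (indices produced by % n are in range whenever n > 0; .getD 0 is unreachable then)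
def kmFmt (inp : List Int) (i : Int) : String :=
  PySem.Int.toStr ((PySem.List.pyGet? inp i).getD 0)

-- the do-while: append the pair, advance, stop when idx is back at 0.  Fuel inp.length suffices.
def kmBLoop (inp : List Int) (n kr : Int) : Nat → Int → List String → List String
  | 0, _, parts => parts
  | f + 1, idx, parts =>
    let nxt := PySem.Int.mod (idx + kr) n
    let parts := parts ++ [kmFmt inp idx ++ " -> " ++ kmFmt inp nxt]
    if nxt = 0 then parts else kmBLoop inp n kr f nxt parts

def k_mapping_alt (inp : List Int) (k : Int) : String :=
  let n : Int := inp.length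
  let kr : Int := if k ≤ n - 1 then k else PySem.Int.mod k n
  if kr = 0 then
    PySem.Str.join ", " (inp.map (fun x => PySem.Int.toStr x ++ " -> " ++ PySem.Int.toStr x))
  else
    PySem.Str.join ", " (kmBLoop inp n kr inp.length 0 [])

-- ===== PRECONDITION & SPEC =====
-- A raises on every input outside Pre_: on empty inp ZeroDivisionError (k % 0) or IndexError,
-- and for k < 0 IndexError (count walks negative past -len).
def Pre_k_mapping (inp : List Int) (k : Int) : Prop := inp ≠ [] ∧ 0 ≤ k
instance (inp : List Int) (k : Int) : Decidable (Pre_k_mapping inp k) := by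
  unfold Pre_k_mapping; infer_instance

def pvWitness_k_mapping : List Int × Int := ([1, 2, 3, 4, 5], 2)

-- On nonempty inp with k < 0, A walks count negative until inp[count] raises IndexError,
-- while B reduces via (idx+kk)%n and returns the chain string.
def Raises_k_mapping (inp : List Int) (k : Int) : Prop := inp ≠ [] ∧ k < 0
instance (inp : List Int) (k : Int) : Decidable (Raises_k_mapping inp k) := by
  unfold Raises_k_mapping; infer_instance
def pvRaiseWitness_k_mapping : List Int × Int := ([1, 2, 3], -1)
def pvRaiseWitnessOut_k_mapping : String := "1 -> 3, 3 -> 2, 2 -> 1"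

def Spec_k_mapping (inp : List Int) (k : Int) (out : String) : Prop := out = k_mapping_alt inp k
instance (inp : List Int) (k : Int) (out : String) : Decidable (Spec_k_mapping inp k out) := by
  unfold Spec_k_mapping; infer_instance

-- ===== CLAIM (what is proved, stated in full; the proofs are below) =====
def Claim_equal_k_mapping : Prop := ∀ (inp : List Int) (k : Int), Dom_k_mapping inp k → Pre_k_mapping inp k → Spec_k_mapping inp k (k_mapping inp k)

def Claim_raises_k_mapping : Prop := (∀ (inp : List Int) (k : Int), Dom_k_mapping inp k → Raises_k_mapping inp k → ¬ Pre_k_mapping inp k) ∧ (Dom_k_mapping (pvRaiseWitness_k_mapping.1) (pvRaiseWitness_k_mapping.2) ∧ Raises_k_mapping (pvRaiseWitness_k_mapping.1) (pvRaiseWitness_k_mapping.2) ∧ k_mapping_alt (pvRaiseWitness_k_mapping.1) (pvRaiseWitness_k_mapping.2) = pvRaiseWitnessOut_k_mapping)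

-- ===== LEMMAS AND PROOFS =====

-- Str.join facts lifted from the PySem.Chars lemmas
theorem kmStrJoinSingleton (sep a : String) : PySem.Str.join sep [a] = a := by
  apply String.toList_inj.mp
  simp [PySem.Str.toList_join, PySem.Chars.join_singleton]

theorem kmStrJoinConsCons (sep a b : String) (t : List String) :
    PySem.Str.join sep (a :: b :: t) = a ++ sep ++ PySem.Str.join sep (b :: t) := by
  apply String.toList_inj.mp
  simp [PySem.Str.toList_join, PySem.Chars.join_cons_cons]

theorem kmStrJoinEmptyCons (a : String) (t : List String) :
    PySem.Str.join "" (a :: t) = a ++ PySem.Str.join "" t := by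
  cases t with
  | nil =>
    rw [kmStrJoinSingleton]
    apply String.toList_inj.mp
    simp [PySem.Str.toList_join]
  | cons b t =>
    rw [kmStrJoinConsCons]
    apply String.toList_inj.mp
    simp

theorem kmStrJoinEmptyNil : PySem.Str.join "" [] = "" := by
  apply String.toList_inj.mp
  simp [PySem.Str.toList_join]

-- proof-side skeleton of A's loop (no accumulator): the list of values inp[c], inp[c'], …
def kmOrbit (inp : List Int) (n kr : Int) : Nat → Int → List Int
  | 0, _ => []
  | f + 1, c =>
    if c ≠ 0 then
      match PySem.List.pyGet? inp c with
      | none => []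
      | some v =>
        v :: kmOrbit inp n kr f (if c + kr > n - 1 then c + kr - n else c + kr)
    else []

-- proof-side skeleton of B's loop: the list of pair strings from index c onwards
def kmPairs (inp : List Int) (n kr : Int) : Nat → Int → List String
  | 0, _ => []
  | f + 1, c =>
    (kmFmt inp c ++ " -> " ++ kmFmt inp (PySem.Int.mod (c + kr) n)) ::
      (if PySem.Int.mod (c + kr) n = 0 then []
       else kmPairs inp n kr f (PySem.Int.mod (c + kr) n))

-- the loop from c returns to index 0 within f steps
def kmSuff (n kr : Int) (f : Nat) (c : Int) : Prop :=
  ∃ j : Nat, 1 ≤ j ∧ j ≤ f ∧ (c + (j : Int) * kr) % n = 0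

theorem kmALoop_eq (inp : List Int) (n kr : Int) (f : Nat) :
    ∀ (c : Int) (out : List Int),
      kmALoop inp n kr f c out = out ++ kmOrbit inp n kr f c := by
  induction f with
  | zero => intro c out; simp [kmALoop, kmOrbit]
  | succ f ih =>
    intro c out
    by_cases hc : c ≠ 0
    · simp only [kmALoop, kmOrbit, if_pos hc]
      cases hv : PySem.List.pyGet? inp c with
      | none => simp
      | some v => simp [ih]
    · simp [kmALoop, kmOrbit, hc]

theorem kmBLoop_eq (inp : List Int) (n kr : Int) (f : Nat) :
    ∀ (c : Int) (parts : List String),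
      kmBLoop inp n kr f c parts = parts ++ kmPairs inp n kr f c := by
  induction f with
  | zero => intro c parts; simp [kmBLoop, kmPairs]
  | succ f ih =>
    intro c parts
    by_cases h0 : PySem.Int.mod (c + kr) n = 0
    · simp [kmBLoop, kmPairs, h0]
    · simp [kmBLoop, kmPairs, h0, ih]

theorem kmOrbit_zero (inp : List Int) (n kr : Int) (f : Nat) :
    kmOrbit inp n kr f 0 = [] := by
  cases f <;> simp [kmOrbit]

-- A's reduction step equals emod on the invariant range
theorem kmRed_eq_emod (n kr c : Int) (hn : 0 < n) (hc0 : 0 ≤ c) (hc1 : c < n)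
    (hk0 : 0 < kr) (hk1 : kr < n) :
    (if c + kr > n - 1 then c + kr - n else c + kr) = (c + kr) % n := by
  by_cases h : c + kr > n - 1
  · rw [if_pos h, ← Int.sub_emod_right (c + kr) n,
      Int.emod_eq_of_lt (by omega) (by omega)]
  · rw [if_neg h, Int.emod_eq_of_lt (by omega) (by omega)]

theorem kmSuff_step (n kr : Int) (f : Nat) (c : Int)
    (h : kmSuff n kr (f + 1) c) (hne : (c + kr) % n ≠ 0) :
    kmSuff n kr f ((c + kr) % n) := by
  obtain ⟨j, hj1, hjf, hj0⟩ := h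
  rcases Nat.lt_or_ge j 2 with hj2 | hj2
  · interval_cases j
    exact absurd (by simpa using hj0) hne
  · refine ⟨j - 1, by omega, by omega, ?_⟩
    rw [Int.emod_add_emod]
    push_cast [Nat.cast_sub (by omega : 1 ≤ j)]
    calc (c + kr + ((j : Int) - 1) * kr) % n = (c + (j : Int) * kr) % n := by ring_nf
    _ = 0 := hj0

-- extra fuel does not change the orbit once termination fits
theorem kmOrbit_succ (inp : List Int) (n kr : Int) (hn : 0 < n) (hk0 : 0 < kr)
    (hk1 : kr < n) (hlen : n = inp.length) (f : Nat) :
    ∀ c : Int, 0 < c → c < n → kmSuff n kr f c →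
      kmOrbit inp n kr (f + 1) c = kmOrbit inp n kr f c := by
  induction f with
  | zero =>
    intro c _ _ hs
    obtain ⟨j, hj1, hjf, _⟩ := hs; omega
  | succ f ih =>
    intro c hc0 hc1 hs
    have hcne : c ≠ 0 := by omega
    have hget : PySem.List.pyGet? inp c = some inp[c.toNat] :=
      PySem.List.pyGet?_eq_some_getElem inp (by omega) (by omega)
    have hred : (if c + kr > n - 1 then c + kr - n else c + kr) = (c + kr) % n :=
      kmRed_eq_emod n kr c hn (by omega) hc1 hk0 hk1
    conv_lhs => rw [kmOrbit]
    conv_rhs => rw [kmOrbit]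
    simp only [if_pos hcne, hget, hred]
    by_cases h0 : (c + kr) % n = 0
    · rw [h0, kmOrbit_zero, kmOrbit_zero]
    · have hs' := kmSuff_step n kr f c hs h0
      have hnx0 : 0 < (c + kr) % n :=
        lt_of_le_of_ne (Int.emod_nonneg _ (by omega)) (Ne.symm h0)
      have hnx1 : (c + kr) % n < n := Int.emod_lt_of_pos _ hn
      rw [ih _ hnx0 hnx1 hs']

-- the master correspondence: A's folded-out chain from c (closed with inp[0])
-- equals "inp[c], " followed by B's joined pairs from c
theorem kmMaster (inp : List Int) (n kr : Int) (hn : 0 < n) (hk0 : 0 < kr)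
    (hk1 : kr < n) (hlen : n = inp.length) (f : Nat) :
    ∀ c : Int, 0 < c → c < n → kmSuff n kr f c →
      (kmOrbit inp n kr f c).foldr
          (fun a s => PySem.Int.toStr a ++ ", " ++ PySem.Int.toStr a ++ " -> " ++ s)
          (kmFmt inp 0)
        = kmFmt inp c ++ ", " ++ PySem.Str.join ", " (kmPairs inp n kr f c) := by
  induction f with
  | zero =>
    intro c _ _ hs
    obtain ⟨j, hj1, hjf, _⟩ := hs; omega
  | succ f ih =>
    intro c hc0 hc1 hs
    have hcne : c ≠ 0 := by omega
    have hget : PySem.List.pyGet? inp c = some inp[c.toNat] :=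
      PySem.List.pyGet?_eq_some_getElem inp (by omega) (by omega)
    have hfmt : kmFmt inp c = PySem.Int.toStr inp[c.toNat] := by
      simp [kmFmt, hget]
    have hred : (if c + kr > n - 1 then c + kr - n else c + kr) = (c + kr) % n :=
      kmRed_eq_emod n kr c hn (by omega) hc1 hk0 hk1
    have hmod : PySem.Int.mod (c + kr) n = (c + kr) % n :=
      PySem.Int.mod_eq_emod_of_pos hn
    conv_lhs => rw [kmOrbit]
    conv_rhs => rw [kmPairs]
    simp only [if_pos hcne, hget, hred, hmod, List.foldr_cons]
    by_cases h0 : (c + kr) % n = 0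
    · -- last link: orbit = [inp[c]], pairs = ["inp[c] -> inp[0]"]
      rw [h0, if_pos rfl, kmOrbit_zero, kmStrJoinSingleton, hfmt]
      simp [String.append_assoc]
    · have hs' := kmSuff_step n kr f c hs h0
      have hnx0 : 0 < (c + kr) % n :=
        lt_of_le_of_ne (Int.emod_nonneg _ (by omega)) (Ne.symm h0)
      have hnx1 : (c + kr) % n < n := Int.emod_lt_of_pos _ hn
      have hfp : ∃ f' : Nat, f = f' + 1 := by
        obtain ⟨j, hj1, hjf, _⟩ := hs'
        exact ⟨f - 1, by omega⟩
      obtain ⟨f', rfl⟩ := hfp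
      have ihx := ih _ hnx0 hnx1 hs'
      rw [if_neg h0, ihx]
      cases hsh : kmPairs inp n kr (f' + 1) ((c + kr) % n) with
      | nil => simp [kmPairs] at hsh
      | cons a t =>
        rw [kmStrJoinConsCons, hfmt]
        simp [String.append_assoc]

-- termination of the orbit: fuel n - 1 is sufficient from c = kr
theorem kmSuff_start (n kr : Int) (hn : 0 < n) (hk0 : 0 < kr) (hk1 : kr < n) :
    kmSuff n kr (n.toNat - 1) kr := by
  set K := kr.toNat with hK
  set N := n.toNat with hN
  have hKpos : 0 < K := by omega
  have hNpos : 0 < N := by omega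
  have hg : 0 < Nat.gcd K N := Nat.gcd_pos_of_pos_left _ hKpos
  obtain ⟨a, ha⟩ := Nat.gcd_dvd_left K N
  obtain ⟨b, hb⟩ := Nat.gcd_dvd_right K N
  have hgltN : Nat.gcd K N < N :=
    lt_of_le_of_lt (Nat.le_of_dvd hKpos (Nat.gcd_dvd_left K N)) (by omega)
  have hb2 : 2 ≤ b := by
    by_contra hlt
    push_neg at hlt
    interval_cases b <;> omega
  have hbN : b ≤ N := by
    calc b = 1 * b := (one_mul b).symm
    _ ≤ Nat.gcd K N * b := Nat.mul_le_mul_right b hg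
    _ = N := hb.symm
  refine ⟨b - 1, by omega, by omega, ?_⟩
  have hKr : ((K : Nat) : Int) = kr := Int.toNat_of_nonneg (by omega)
  have hNr : ((N : Nat) : Int) = n := Int.toNat_of_nonneg (by omega)
  have h2 : b * K = N * a := by
    calc b * K = b * (Nat.gcd K N * a) := by rw [← ha]
    _ = (Nat.gcd K N * b) * a := by ring
    _ = N * a := by rw [← hb]
  have h3 : (b : Int) * kr = n * (a : Int) := by
    have h2' : ((b : Nat) : Int) * ((K : Nat) : Int) = ((N : Nat) : Int) * ((a : Nat) : Int) := by
      exact_mod_cast congrArg (fun x : Nat => (x : Int)) h2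
    rw [← hKr, ← hNr]
    exact h2'
  have hdvd : (n : Int) ∣ (kr + ((b : Int) - 1) * kr) := by
    rw [show kr + ((b : Int) - 1) * kr = (b : Int) * kr by ring, h3]
    exact Dvd.intro _ rfl
  push_cast [Nat.cast_sub (by omega : 1 ≤ b)]
  exact Int.emod_eq_zero_of_dvd hdvd

-- A's zip/extend/join post-processing of out, closed with t, is the foldr chain
theorem kmOut3_join (out : List Int) (t : String) :
    PySem.Str.join ""
        ((out.zip (out.map (fun x => ", " ++ PySem.Int.toStr x ++ " -> "))).flatMap
          (fun p => [PySem.Int.toStr p.1, p.2])) ++ t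
      = out.foldr
          (fun a s => PySem.Int.toStr a ++ ", " ++ PySem.Int.toStr a ++ " -> " ++ s) t := by
  induction out with
  | nil => simp [kmStrJoinEmptyNil]
  | cons x xs ih =>
    simp only [List.map_cons, List.zip_cons_cons, List.flatMap_cons, List.cons_append,
      List.nil_append, List.foldr_cons, ← ih]
    rw [kmStrJoinEmptyCons, kmStrJoinEmptyCons]
    simp [String.append_assoc]

-- ===== VERDICT (by name: the statement is the Claim_ definition above) =====
theorem k_mapping_spec : Claim_equal_k_mapping := by
  intro inp k _ hpre
  obtain ⟨hne, hk⟩ := hpre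
  unfold Spec_k_mapping
  have hnpos : 0 < (inp.length : Int) := by
    cases inp with
    | nil => exact absurd rfl hne
    | cons a t => simp
  show k_mapping inp k = k_mapping_alt inp k
  simp only [k_mapping, k_mapping_alt]
  set n : Int := (inp.length : Int) with hn
  have hkr : (if k ≤ n - 1 then k else PySem.Int.mod k n)
      = (if k > n - 1 then PySem.Int.mod k n else k) := by
    split_ifs with h1 h2 <;> first | rfl | omega
  rw [hkr]
  have hmodk : PySem.Int.mod k n = k % n := PySem.Int.mod_eq_emod_of_pos hnpos
  set kr : Int := if k > n - 1 then PySem.Int.mod k n else k with hkrdef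
  have hkr0 : 0 ≤ kr := by
    rw [hkrdef]; split_ifs with h
    · rw [hmodk]; exact Int.emod_nonneg _ (by omega)
    · exact hk
  have hkr1 : kr < n := by
    rw [hkrdef]; split_ifs with h
    · rw [hmodk]; exact Int.emod_lt_of_pos _ hnpos
    · omega
  by_cases hz : kr = 0
  · rw [if_pos hz, if_pos hz]
  · rw [if_neg hz, if_neg hz]
    have hkrpos : 0 < kr := lt_of_le_of_ne hkr0 (Ne.symm hz)
    obtain ⟨m, hm⟩ : ∃ m, inp.length = m + 2 := ⟨inp.length - 2, by omega⟩
    have hnm : n = (m : Int) + 2 := by rw [hn, hm]; push_cast; ring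
    have hsuff : kmSuff n kr (m + 1) kr := by
      have h := kmSuff_start n kr hnpos hkrpos hkr1
      have hfuel : n.toNat - 1 = m + 1 := by omega
      rwa [hfuel] at h
    rw [hm]
    -- A side
    rw [kmALoop_eq, List.nil_append]
    rw [show m + 2 = (m + 1) + 1 from rfl,
      kmOrbit_succ inp n kr hnpos hkrpos hkr1 hn (m + 1) kr hkrpos hkr1 hsuff]
    rw [PySem.List.foldl_append_eq_flatMap
        (fun p : Int × String => [PySem.Int.toStr p.1, p.2]), List.nil_append]
    -- B side
    rw [kmBLoop_eq, List.nil_append]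
    have hmodkr : PySem.Int.mod (0 + kr) n = kr := by
      rw [zero_add, PySem.Int.mod_eq_emod_of_pos hnpos, Int.emod_eq_of_lt hkr0 hkr1]
    conv_rhs => rw [kmPairs]
    rw [hmodkr, if_neg hz]
    -- combine through the master correspondence
    have hA := kmOut3_join (kmOrbit inp n kr (m + 1) kr) (kmFmt inp 0)
    have hM := kmMaster inp n kr hnpos hkrpos hkr1 hn (m + 1) kr hkrpos hkr1 hsuff
    have key := hA.trans hM
    cases hsh : kmPairs inp n kr (m + 1) kr with
    | nil => simp [kmPairs] at hsh
    | cons a t =>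
      rw [kmStrJoinConsCons]
      rw [hsh] at key
      rw [show PySem.Int.toStr ((PySem.List.pyGet? inp 0).getD 0) = kmFmt inp 0 from rfl]
      simp only [String.append_assoc]
      simp only [String.append_assoc] at key
      rw [key]

theorem k_mapping_raises : Claim_raises_k_mapping := by
  unfold Claim_raises_k_mapping
  constructor
  · intro inp k _ hr hp
    obtain ⟨_, hneg⟩ := hr
    obtain ⟨_, hk0⟩ := hp
    omega
  · exact ⟨by decide, by decide, by decide⟩

-- witness self-check: B's port really returns the stated value at the raise witness
theorem k_mapping_raises_witness_ok :
    k_mapping_alt pvRaiseWitness_k_mapping.1 pvRaiseWitness_k_mapping.2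
      = pvRaiseWitnessOut_k_mapping :=
  k_mapping_raises.2.2.2
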